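-- pv_equiv track=rewrite | github.com/yourlabs/django-dbdiff | dbdiff/utils.py | _get_unexpected
-- ===== SOURCE A (Python) =====
-- def _get_unexpected(expected, result):
--     unexpected = {}
--
--     for model, result_instances in result.items():
--         expected_pks = expected.get(model, {}).keys()
--
--         for pk, result_fields in result_instances.items():
--             if pk in expected_pks:
--                 continue
--
--             unexpected.setdefault(model, {})
--             unexpected[model][pk] = result_fields
--
--     return unexpected
-- ===== SOURCE B (Python) =====
-- def _get_unexpected(expected, result):
--     # Subtractive strategy: start from a copy of result, delete every expected
--     # pk from it, then drop models whose sub-dict became empty.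
--     unexpected = {model: dict(instances) for model, instances in result.items()}
--     for model, expected_instances in expected.items():
--         remaining = unexpected.get(model)
--         if remaining is None:
--             continue
--         for pk in expected_instances:
--             remaining.pop(pk, None)
--     return {model: instances for model, instances in unexpected.items() if instances}
-- ===== Notes on version B (the rewrite author's own statement) =====
-- stated objective: alternative
-- what changed: Inverts the traversal: instead of scanning result's entries and inserting those whose pk is not expected, B copies result wholesale, iterates over EXPECTED deleting each expected pk from the copy, and finally drops models whose sub-dict became empty; Pre_ only excludes association lists with duplicated model keys (in expected or result) or duplicated pk keys inside a result model, which do not represent any Python dict.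
import Mathlib
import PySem

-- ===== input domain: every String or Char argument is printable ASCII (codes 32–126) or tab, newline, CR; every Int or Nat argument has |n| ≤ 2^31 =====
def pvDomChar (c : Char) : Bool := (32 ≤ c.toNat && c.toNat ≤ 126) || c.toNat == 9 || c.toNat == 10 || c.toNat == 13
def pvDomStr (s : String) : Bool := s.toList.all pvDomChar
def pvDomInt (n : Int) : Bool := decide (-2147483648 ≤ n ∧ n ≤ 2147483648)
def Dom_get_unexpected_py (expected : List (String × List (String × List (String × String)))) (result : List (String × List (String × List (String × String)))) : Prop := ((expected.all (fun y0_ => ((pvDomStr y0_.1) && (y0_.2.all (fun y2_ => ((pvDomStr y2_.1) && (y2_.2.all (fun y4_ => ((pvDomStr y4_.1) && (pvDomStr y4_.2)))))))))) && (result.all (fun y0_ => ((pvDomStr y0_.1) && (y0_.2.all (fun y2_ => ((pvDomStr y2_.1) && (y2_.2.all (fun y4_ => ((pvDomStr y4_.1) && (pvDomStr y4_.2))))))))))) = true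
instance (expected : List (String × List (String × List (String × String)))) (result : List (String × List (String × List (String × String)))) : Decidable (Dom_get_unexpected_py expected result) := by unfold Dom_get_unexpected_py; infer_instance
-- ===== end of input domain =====

-- B replaces A's membership-filtered accumulation (driven by result's entries) with a
-- subtractive pass: copy result, delete every expected pk from the copy while iterating
-- over EXPECTED, then drop emptied models (alternative decomposition, same cost).

-- ===== PORT A =====
def get_unexpected_py (expected : List (String × List (String × List (String × String)))) (result : List (String × List (String × List (String × String)))) : List (String × List (String × List (String × String))) :=
  ((result.foldl (fun unexpected p =>
      let expected_pks := (PySem.Dict.mk ((PySem.Dict.mk expected).getD p.1 [])).keys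
      p.2.foldl (fun unexpected q =>
        if q.1 ∈ expected_pks then unexpected
        else
          let u1 := unexpected.setdefault p.1 PySem.Dict.empty
          u1.insert p.1 ((u1.getD p.1 PySem.Dict.empty).insert q.1 q.2)) unexpected)
    (PySem.Dict.empty : PySem.Dict String (PySem.Dict String (List (String × String))))).items).map
    (fun r => (r.1, r.2.items))

-- ===== PORT B =====
def get_unexpected_py_alt (expected : List (String × List (String × List (String × String)))) (result : List (String × List (String × List (String × String)))) : List (String × List (String × List (String × String))) :=
  -- unexpected = {model: dict(instances) for model, instances in result.items()}
  let unexpected := result.foldl (fun u p => u.insert p.1 (PySem.Dict.mk p.2))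
      (PySem.Dict.empty : PySem.Dict String (PySem.Dict String (List (String × String))))
  -- for model, expected_instances in expected.items(): pop each expected pk from the copy
  -- (in-place mutation of remaining is modelled as re-inserting the value at its key)
  let unexpected := (PySem.Dict.mk expected).items.foldl (fun u me =>
      match u.get? me.1 with
      | none => u
      | some remaining =>
          u.insert me.1 ((PySem.Dict.mk me.2).keys.foldl (fun d pk => d.erase pk) remaining)) unexpected
  -- return {model: instances for model, instances in unexpected.items() if instances}
  (unexpected.items.filter (fun r => !(r.2.size == 0))).map (fun r => (r.1, r.2.items))

-- ===== PRECONDITION & SPEC =====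
-- Pre_ excludes association lists with a duplicated model key (in expected or result) or a
-- duplicated pk key inside a result model: such lists do not represent any Python dict.
def Pre_get_unexpected_py (expected : List (String × List (String × List (String × String)))) (result : List (String × List (String × List (String × String)))) : Prop :=
  (expected.map Prod.fst).Nodup ∧ (result.map Prod.fst).Nodup ∧
    ∀ p ∈ result, (p.2.map Prod.fst).Nodup
instance (expected : List (String × List (String × List (String × String)))) (result : List (String × List (String × List (String × String)))) : Decidable (Pre_get_unexpected_py expected result) := by unfold Pre_get_unexpected_py; infer_instance

def pvWitness_get_unexpected_py : (List (String × List (String × List (String × String)))) × (List (String × List (String × List (String × String)))) :=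
  ([("m", [("1", [("f", "v")])])], [("m", [("1", [("f", "w")]), ("2", [("g", "x")])]), ("n", [("3", [])])])

def Spec_get_unexpected_py (expected : List (String × List (String × List (String × String)))) (result : List (String × List (String × List (String × String)))) (out : List (String × List (String × List (String × String)))) : Prop := out = get_unexpected_py_alt expected result
instance (expected : List (String × List (String × List (String × String)))) (result : List (String × List (String × List (String × String)))) (out : List (String × List (String × List (String × String)))) : Decidable (Spec_get_unexpected_py expected result out) := by unfold Spec_get_unexpected_py; infer_instance

-- ===== CLAIM (what is proved, stated in full; the proofs are below) =====
def Claim_equal_get_unexpected_py : Prop := ∀ (expected : List (String × List (String × List (String × String)))) (result : List (String × List (String × List (String × String)))), Dom_get_unexpected_py expected result → Pre_get_unexpected_py expected result → Spec_get_unexpected_py expected result (get_unexpected_py expected result)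

-- ===== LEMMAS AND PROOFS =====

abbrev PVInner := PySem.Dict String (List (String × String))
abbrev PVOuter := PySem.Dict String PVInner

-- the pk keys expected for model m
def pvEKeys (expected : List (String × List (String × List (String × String)))) (m : String) : List String :=
  (PySem.Dict.mk ((PySem.Dict.mk expected).getD m [])).keys

-- the entries of one result model that survive (pk not expected)
def pvSurv (expected : List (String × List (String × List (String × String)))) (p : String × List (String × List (String × String))) : List (String × List (String × String)) :=
  p.2.filter (fun q => !((pvEKeys expected p.1).contains q.1))

-- erasing a list of keys
def pvEraseAll (d : PVInner) (K : List String) : PVInner :=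
  K.foldl (fun d k => d.erase k) d

-- fold of inserts
def pvIns (d : PVInner) (l : List (String × List (String × String))) : PVInner :=
  l.foldl (fun d q => d.insert q.1 q.2) d

theorem pv_contains_eq_keys_contains (d : PVInner) (k : String) :
    d.contains k = d.keys.contains k := by
  by_cases h : k ∈ d.keys
  · rw [(PySem.Dict.contains_iff_mem_keys d k).mpr h, List.contains_iff_mem.mpr h]
  · have h1 : d.contains k = false := by
      by_contra hc
      exact h ((PySem.Dict.contains_iff_mem_keys d k).mp (Bool.of_not_eq_false hc))
    have h2 : d.keys.contains k = false := by
      by_contra hc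
      exact h (List.contains_iff_mem.mp (Bool.of_not_eq_false hc))
    rw [h1, h2]

-- items of pvEraseAll: erase each key in K filters the items list
theorem pv_eraseAll_items (K : List String) : ∀ d : PVInner,
    (pvEraseAll d K).items = d.items.filter (fun q => !(K.contains q.1)) := by
  induction K with
  | nil => intro d; simp [pvEraseAll]
  | cons k K ih =>
    intro d
    show (pvEraseAll (d.erase k) K).items = _
    rw [ih]
    show ((d.items.filter (fun p => !(p.1 == k))).filter _) = _
    rw [List.filter_filter]
    apply List.filter_congr
    intro q _
    by_cases h1 : q.1 = k
    · simp [h1]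
    · simp [h1]

-- A's setdefault step, unfolded
theorem pv_setdefault_step (u : PVOuter) (m : String) (q : String × List (String × String)) :
    (let u1 := u.setdefault m PySem.Dict.empty
     u1.insert m ((u1.getD m PySem.Dict.empty).insert q.1 q.2)) =
    u.insert m ((u.getD m PySem.Dict.empty).insert q.1 q.2) := by
  by_cases hc : u.contains m = true
  · simp [PySem.Dict.setdefault_of_contains u PySem.Dict.empty hc]
  · have hcf : u.contains m = false := Bool.not_eq_true _ ▸ hc
    simp only [PySem.Dict.setdefault_of_not_contains u PySem.Dict.empty hcf,
      PySem.Dict.getD_insert_self, PySem.Dict.insert_insert_self,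
      PySem.Dict.getD_of_not_contains u PySem.Dict.empty hcf]

theorem pv_inner_step_fun (d : PVInner) (m : String) :
    (fun (u : PVOuter) (q : String × List (String × String)) =>
      if q.1 ∈ d.keys then u
      else
        let u1 := u.setdefault m PySem.Dict.empty
        u1.insert m ((u1.getD m PySem.Dict.empty).insert q.1 q.2)) =
    (fun (u : PVOuter) (q : String × List (String × String)) =>
      if q.1 ∈ d.keys then u
      else u.insert m ((u.getD m PySem.Dict.empty).insert q.1 q.2)) := by
  funext u q
  by_cases h : q.1 ∈ d.keys
  · simp [h]
  · simp only [if_neg h]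
    exact pv_setdefault_step u m q

-- A's inner loop: skip if nothing survives, else one outer insert of the survivors
theorem pv_inner_eq_aux (d : PVInner) (m : String) :
    ∀ (l : List (String × List (String × String))) (u : PVOuter),
      l.foldl (fun u q =>
        if q.1 ∈ d.keys then u
        else u.insert m ((u.getD m PySem.Dict.empty).insert q.1 q.2)) u =
      (if (l.filter (fun q => !(d.contains q.1))).isEmpty then u
       else u.insert m (pvIns (u.getD m PySem.Dict.empty) (l.filter (fun q => !(d.contains q.1))))) := by
  intro l
  induction l with
  | nil => intro u; simp
  | cons q t ih =>
    intro u
    by_cases hc : d.contains q.1 = true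
    · have hm : q.1 ∈ d.keys := (PySem.Dict.contains_iff_mem_keys d q.1).mp hc
      simp only [List.foldl_cons, List.filter_cons, hc, Bool.not_true, if_pos hm]
      exact ih u
    · have hcf : d.contains q.1 = false := Bool.not_eq_true _ ▸ hc
      have hm : q.1 ∉ d.keys := fun h => hc ((PySem.Dict.contains_iff_mem_keys d q.1).mpr h)
      simp only [List.foldl_cons, List.filter_cons, hcf, Bool.not_false, if_neg hm]
      rw [ih]
      simp only [pvIns,
                 PySem.Dict.getD_insert_self, PySem.Dict.insert_insert_self]
      by_cases he : (t.filter (fun q => !(d.contains q.1))).isEmpty = true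
      · simp [List.isEmpty_iff.mp he]
      · simp [he]

theorem pv_inner_eq (d : PVInner) (m : String) :
    ∀ (l : List (String × List (String × String))) (u : PVOuter),
      l.foldl (fun u q =>
        if q.1 ∈ d.keys then u
        else
          let u1 := u.setdefault m PySem.Dict.empty
          u1.insert m ((u1.getD m PySem.Dict.empty).insert q.1 q.2)) u =
      (if (l.filter (fun q => !(d.contains q.1))).isEmpty then u
       else u.insert m (pvIns (u.getD m PySem.Dict.empty) (l.filter (fun q => !(d.contains q.1))))) := by
  intro l u
  rw [pv_inner_step_fun d m]
  exact pv_inner_eq_aux d m l u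

-- pvIns from empty over a key-nodup list is the raw dict
theorem pv_ins_empty (l : List (String × List (String × String)))
    (h : (l.map Prod.fst).Nodup) : pvIns PySem.Dict.empty l = PySem.Dict.mk l := by
  apply PySem.Dict.ext
  have := PySem.Dict.items_foldl_insert_fresh l Prod.fst Prod.snd
      (PySem.Dict.empty : PVInner) (fun a _ => PySem.Dict.contains_empty a.1) h
  simpa [pvIns] using this

-- the inner filter of pv_inner_eq is pvSurv
theorem pv_filter_eq_surv (expected : List (String × List (String × List (String × String))))
    (p : String × List (String × List (String × String))) :
    p.2.filter (fun q => !((PySem.Dict.mk ((PySem.Dict.mk expected).getD p.1 [])).contains q.1)) =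
      pvSurv expected p := by
  unfold pvSurv pvEKeys
  apply List.filter_congr
  intro q _
  rw [pv_contains_eq_keys_contains]

-- A's outer fold appends, per surviving model, the dict of its survivors
theorem pv_A_items (expected : List (String × List (String × List (String × String)))) :
    ∀ (res : List (String × List (String × List (String × String)))) (u : PVOuter),
      (res.map Prod.fst).Nodup →
      (∀ p ∈ res, u.contains p.1 = false) →
      (∀ p ∈ res, (p.2.map Prod.fst).Nodup) →
      (res.foldl (fun unexpected p =>
          let expected_pks := (PySem.Dict.mk ((PySem.Dict.mk expected).getD p.1 [])).keys
          p.2.foldl (fun unexpected q =>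
            if q.1 ∈ expected_pks then unexpected
            else
              let u1 := unexpected.setdefault p.1 PySem.Dict.empty
              u1.insert p.1 ((u1.getD p.1 PySem.Dict.empty).insert q.1 q.2)) unexpected) u).items =
      u.items ++ (res.filter (fun p => !(pvSurv expected p).isEmpty)).map
          (fun p => (p.1, PySem.Dict.mk (pvSurv expected p))) := by
  intro res
  induction res with
  | nil => intro u _ _ _; simp
  | cons p t ih =>
    intro u hnd hfresh hinner
    simp only [List.map_cons, List.nodup_cons] at hnd
    have hfp : u.contains p.1 = false := hfresh p (List.mem_cons_self ..)
    simp only [List.foldl_cons]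
    rw [pv_inner_eq, PySem.Dict.getD_of_not_contains u PySem.Dict.empty hfp,
        pv_filter_eq_surv expected p]
    have hsurvnd : ((pvSurv expected p).map Prod.fst).Nodup := by
      have hsub : (pvSurv expected p).Sublist p.2 := List.filter_sublist
      exact (hsub.map Prod.fst).nodup (hinner p (List.mem_cons_self ..))
    by_cases he : (pvSurv expected p).isEmpty = true
    · simp only [List.filter_cons, he, Bool.not_true]
      exact ih u hnd.2 (fun p' hp' => hfresh p' (List.mem_cons_of_mem _ hp'))
        (fun p' hp' => hinner p' (List.mem_cons_of_mem _ hp'))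
    · have heb : (!(pvSurv expected p).isEmpty) = true := by simp [he]
      simp only [if_neg he, List.filter_cons, heb]
      rw [pv_ins_empty _ hsurvnd]
      rw [ih _ hnd.2 ?_ (fun p' hp' => hinner p' (List.mem_cons_of_mem _ hp'))]
      · rw [PySem.Dict.items_insert_of_not_contains u _ hfp]
        simp
      · intro p' hp'
        rw [PySem.Dict.contains_insert _ p.1 p'.1]
        have hne : p'.1 ≠ p.1 := fun h => hnd.1 (h ▸ List.mem_map_of_mem hp')
        simp [hne, hfresh p' (List.mem_cons_of_mem _ hp')]

-- B's deletion loop rewrites every entry by erasing its expected keys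
theorem pv_B_loop (L : List (String × List (String × List (String × String)))) :
    ∀ (u : PVOuter), (L.map Prod.fst).Nodup → u.keys.Nodup →
      (L.foldl (fun u me =>
          match u.get? me.1 with
          | none => u
          | some remaining =>
              u.insert me.1 ((PySem.Dict.mk me.2).keys.foldl (fun d pk => d.erase pk) remaining)) u).items =
      u.items.map (fun r => (r.1, pvEraseAll r.2 (pvEKeys L r.1))) := by
  induction L with
  | nil =>
    intro u _ _
    simp only [List.foldl_nil]
    rw [show (fun (r : String × PVInner) => (r.1, pvEraseAll r.2 (pvEKeys [] r.1))) = id from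
      funext fun r => rfl, List.map_id]
  | cons me T ih =>
    obtain ⟨m1, m2⟩ := me
    intro u hnd hknd
    simp only [List.map_cons, List.nodup_cons] at hnd
    simp only [List.foldl_cons]
    cases hget : u.get? m1 with
    | none =>
      rw [ih u hnd.2 hknd]
      apply List.map_congr_left
      intro r hr
      have hrne : r.1 ≠ m1 := by
        intro h
        exact (PySem.Dict.get?_eq_none_iff_not_mem_keys u m1).mp hget
          (h ▸ List.mem_map_of_mem hr)
      have : pvEKeys ((m1, m2) :: T) r.1 = pvEKeys T r.1 := by
        unfold pvEKeys
        rw [PySem.Dict.getD, PySem.Dict.get?_mk_cons, PySem.Dict.getD]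
        simp [hrne.symm]
      rw [← this]
    | some remaining =>
      have hcont : u.contains m1 = true := by
        rw [PySem.Dict.contains_eq_isSome_get?, hget]; rfl
      have hknd' : (u.insert m1 ((PySem.Dict.mk m2).keys.foldl (fun d pk => d.erase pk) remaining)).keys.Nodup := by
        rw [PySem.Dict.keys_insert_of_contains u _ hcont]; exact hknd
      rw [ih _ hnd.2 hknd', PySem.Dict.items_insert_of_contains u _ hcont, List.map_map]
      apply List.map_congr_left
      intro r hr
      simp only [Function.comp]
      by_cases hre : r.1 = m1
      · have hrv : r.2 = remaining := by
          have := PySem.Dict.get?_of_mem_items u (k := r.1) (v := r.2) hr hknd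
          rw [hre, hget] at this
          exact (Option.some.injEq _ _).mp this.symm
        have hTnone : (PySem.Dict.mk T : PySem.Dict String (List (String × List (String × String)))).get? m1 = none := by
          rw [PySem.Dict.get?_eq_none_iff_not_mem_keys]
          simpa using hnd.1
        have hk1 : pvEKeys ((m1, m2) :: T) m1 = (PySem.Dict.mk m2).keys := by
          unfold pvEKeys
          rw [PySem.Dict.getD, PySem.Dict.get?_mk_cons]
          simp
        have hk2 : pvEKeys T m1 = [] := by
          unfold pvEKeys
          rw [PySem.Dict.getD, hTnone]
          rfl
        simp only [hre, beq_self_eq_true, if_true, hrv]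
        rw [hk2, hk1]
        rfl
      · have hbe : (r.1 == m1) = false := by simp [hre]
        simp only [hbe, Bool.false_eq_true, if_false]
        have : pvEKeys ((m1, m2) :: T) r.1 = pvEKeys T r.1 := by
          unfold pvEKeys
          rw [PySem.Dict.getD, PySem.Dict.get?_mk_cons, PySem.Dict.getD]
          have : (m1 == r.1) = false := by simp [Ne.symm hre]
          simp [this]
        rw [this]

-- erased copy's items are the surviving entries
theorem pv_erase_mk_items (expected : List (String × List (String × List (String × String))))
    (p : String × List (String × List (String × String))) :
    (pvEraseAll (PySem.Dict.mk p.2) (pvEKeys expected p.1)).items = pvSurv expected p := by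
  rw [pv_eraseAll_items]
  rfl

-- the final comprehension step, on both ports' shapes
theorem pv_final (expected : List (String × List (String × List (String × String)))) :
    ∀ (l : List (String × List (String × List (String × String)))),
    ((l.filter (fun p => !(pvSurv expected p).isEmpty)).map
        (fun p => (p.1, PySem.Dict.mk (pvSurv expected p)))).map (fun r => (r.1, r.2.items)) =
    ((l.map (fun p => (p.1, pvEraseAll (PySem.Dict.mk p.2) (pvEKeys expected p.1)))).filter
        (fun (r : String × PVInner) => !(r.2.size == 0))).map (fun r => (r.1, r.2.items)) := by
  intro l
  induction l with
  | nil => rfl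
  | cons p t ih =>
    have hsz : (pvEraseAll (PySem.Dict.mk p.2) (pvEKeys expected p.1)).size
        = (pvSurv expected p).length := by
      show (pvEraseAll (PySem.Dict.mk p.2) (pvEKeys expected p.1)).items.length = _
      rw [pv_erase_mk_items]
    simp only [List.filter_cons, List.map_cons]
    cases hs : pvSurv expected p with
    | nil =>
      have h2 : (!((pvEraseAll (PySem.Dict.mk p.2) (pvEKeys expected p.1)).size == 0)) = false := by
        rw [hsz, hs]; rfl
      simp only [List.isEmpty_nil, Bool.not_true, Bool.false_eq_true, if_false, h2]
      exact ih
    | cons a b =>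
      have h2 : (!((pvEraseAll (PySem.Dict.mk p.2) (pvEKeys expected p.1)).size == 0)) = true := by
        rw [hsz, hs]; rfl
      simp only [List.isEmpty_cons, Bool.not_false, if_true, h2, List.map_cons]
      rw [ih, pv_erase_mk_items]

-- ===== VERDICT (by name: the statement is the Claim_ definition above) =====
theorem get_unexpected_py_spec : Claim_equal_get_unexpected_py := by
  intro expected result _hdom hpre
  obtain ⟨hend, hrnd, hinner⟩ := hpre
  show get_unexpected_py expected result = get_unexpected_py_alt expected result
  unfold get_unexpected_py get_unexpected_py_alt
  rw [pv_A_items expected result PySem.Dict.empty hrnd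
      (fun p _ => PySem.Dict.contains_empty p.1) hinner]
  have hu0 : (result.foldl (fun u p => u.insert p.1 (PySem.Dict.mk p.2))
      (PySem.Dict.empty : PVOuter)).items = result.map (fun p => (p.1, PySem.Dict.mk p.2)) := by
    have := PySem.Dict.items_foldl_insert_fresh result Prod.fst (fun p => PySem.Dict.mk p.2)
      (PySem.Dict.empty : PVOuter) (fun a _ => PySem.Dict.contains_empty a.1) hrnd
    simpa using this
  have hu0k : (result.foldl (fun u p => u.insert p.1 (PySem.Dict.mk p.2))
      (PySem.Dict.empty : PVOuter)).keys.Nodup := by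
    show ((result.foldl (fun u p => u.insert p.1 (PySem.Dict.mk p.2))
      (PySem.Dict.empty : PVOuter)).items.map Prod.fst).Nodup
    rw [hu0, List.map_map]
    simpa using hrnd
  have hL : (PySem.Dict.mk expected).items = expected := rfl
  have hLnd : ((PySem.Dict.mk expected).items.map Prod.fst).Nodup := by rw [hL]; exact hend
  show _ = List.map (fun (r : String × PVInner) => (r.1, r.2.items))
      (List.filter (fun (r : String × PVInner) => !(r.2.size == 0))
        ((List.foldl (fun (u : PVOuter) me =>
            match u.get? me.1 with
            | none => u
            | some remaining =>
                u.insert me.1 ((PySem.Dict.mk me.2).keys.foldl (fun d pk => d.erase pk) remaining))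
          (result.foldl (fun u p => u.insert p.1 (PySem.Dict.mk p.2)) (PySem.Dict.empty : PVOuter))
          (PySem.Dict.mk expected).items).items))
  rw [pv_B_loop ((PySem.Dict.mk expected).items) _ hLnd hu0k, hu0, List.map_map, hL]
  have hemp : (PySem.Dict.empty : PVOuter).items = [] := rfl
  rw [hemp, List.nil_append]
  rw [List.map_congr_left (l := result)
      (f := (fun (r : String × PVInner) => (r.1, pvEraseAll r.2 (pvEKeys expected r.1))) ∘
        (fun p => (p.1, PySem.Dict.mk p.2)))
      (g := fun p => (p.1, pvEraseAll (PySem.Dict.mk p.2) (pvEKeys expected p.1)))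
      (fun p _ => rfl)]
  exact pv_final expected result
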